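-- pv_equiv track=rewrite | github.com/n-evansgibson/3D-vector-grapher | calculator.py | giveVarsMultipliers
-- ===== SOURCE A (Python) =====
-- import string
--
-- def giveVarsMultipliers(exp):
--     vars = ['x', 'y', 'z']
--     i = 0
--     while i < len(exp):
--         c = exp[i]
--         if c in vars and (exp[i-1] in string.digits or exp[i-1] in vars) and i != 0:
--             exp = exp[:i] + '*' + exp[i:]
--             i += 1
--         i += 1
--     return exp
-- ===== SOURCE B (Python) =====
-- def giveVarsMultipliers(exp):
--     # one pass over adjacent pairs; no index arithmetic or in-place insertion
--     pieces = [exp[:1]]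
--     for a, b in zip(exp, exp[1:]):
--         if b in 'xyz' and (a in '0123456789' or a in 'xyz'):
--             pieces.append('*')
--         pieces.append(b)
--     return ''.join(pieces)
-- ===== Notes on version B (the rewrite author's own statement) =====
-- stated objective: simpler
-- what changed: Replaced the while loop that mutates the string in place (re-slicing exp and juggling the index past each inserted '*') by a single forward pass over adjacent character pairs that collects output pieces and joins them once.
import Mathlib
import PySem

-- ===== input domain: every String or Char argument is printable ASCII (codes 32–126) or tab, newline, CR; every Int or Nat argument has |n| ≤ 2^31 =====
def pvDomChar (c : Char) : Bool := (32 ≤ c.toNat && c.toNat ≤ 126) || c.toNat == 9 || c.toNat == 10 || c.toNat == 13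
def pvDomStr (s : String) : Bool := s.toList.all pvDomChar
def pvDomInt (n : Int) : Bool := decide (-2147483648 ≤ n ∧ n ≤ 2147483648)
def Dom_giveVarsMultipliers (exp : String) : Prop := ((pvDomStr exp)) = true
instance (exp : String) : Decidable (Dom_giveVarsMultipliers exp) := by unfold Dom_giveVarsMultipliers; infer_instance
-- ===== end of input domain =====

-- B replaces A's index-juggling while loop with in-place string insertion by a single
-- pass over adjacent character pairs (objective: simpler).

-- shared literal tests both Pythons write verbatim: `c in ['x','y','z']` / `c in '0123456789'`
def pvIsVar (c : Char) : Bool := ['x', 'y', 'z'].contains c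
def pvIsDigit (c : Char) : Bool := ("0123456789".toList).contains c

-- ===== PORT A =====
-- the while loop on state (exp, i); exp[i-1] is PySem pyGet? (negative index wraps);
-- the `none` arm of prev is unreachable (i < length means the list is nonempty)
def giveVarsMultipliersLoop (exp : List Char) (i : Nat) : List Char :=
  if h : i < exp.length then
    let c := exp[i]
    let prev := PySem.List.pyGet? exp ((i : Int) - 1)
    if pvIsVar c &&
        (match prev with
         | some p => pvIsDigit p || pvIsVar p
         | none => false) && decide (i ≠ 0) then
      giveVarsMultipliersLoop (exp.take i ++ '*' :: exp.drop i) (i + 2)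
    else
      giveVarsMultipliersLoop exp (i + 1)
  else exp
termination_by exp.length - i
decreasing_by
  · have : (exp.take i ++ '*' :: exp.drop i).length = exp.length + 1 := by
      simp
    omega
  · omega

def giveVarsMultipliers (exp : String) : String :=
  String.ofList (giveVarsMultipliersLoop exp.toList 0)

-- ===== PORT B =====
def giveVarsMultipliers_alt (exp : String) : String :=
  let l := exp.toList
  let pieces := l.take 1
  String.ofList ((l.zip l.tail).foldl
    (fun acc (ab : Char × Char) =>
      if pvIsVar ab.2 && (pvIsDigit ab.1 || pvIsVar ab.1) then
        acc ++ ['*', ab.2]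
      else
        acc ++ [ab.2]) pieces)

-- ===== PRECONDITION & SPEC =====
def Spec_giveVarsMultipliers (exp : String) (out : String) : Prop := out = giveVarsMultipliers_alt exp
instance (exp : String) (out : String) : Decidable (Spec_giveVarsMultipliers exp out) := by unfold Spec_giveVarsMultipliers; infer_instance

-- ===== CLAIM (what is proved, stated in full; the proofs are below) =====
def Claim_equal_giveVarsMultipliers : Prop := ∀ (exp : String), Dom_giveVarsMultipliers exp → Spec_giveVarsMultipliers exp (giveVarsMultipliers exp)

-- ===== LEMMAS AND PROOFS =====

-- reference scan: what gets emitted after a previous character `prev`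
def pvScan (prev : Char) (l : List Char) : List Char :=
  match l with
  | [] => []
  | c :: rest =>
    if pvIsVar c && (pvIsDigit prev || pvIsVar prev) then
      '*' :: c :: pvScan c rest
    else
      c :: pvScan c rest

theorem pvFoldl_scan (rest : List Char) (prev : Char) (acc : List Char) :
    ((prev :: rest).zip rest).foldl
      (fun acc (ab : Char × Char) =>
        if pvIsVar ab.2 && (pvIsDigit ab.1 || pvIsVar ab.1) then
          acc ++ ['*', ab.2]
        else
          acc ++ [ab.2]) acc = acc ++ pvScan prev rest := by
  induction rest generalizing prev acc with
  | nil => simp [pvScan]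
  | cons c rs ih =>
    simp only [List.zip_cons_cons, List.foldl_cons, pvScan]
    by_cases hc : (pvIsVar c && (pvIsDigit prev || pvIsVar prev)) = true
    · simp only [hc, if_true, ih]; simp
    · simp only [Bool.not_eq_true] at hc
      simp only [hc, ih]; simp

theorem pvLoop_scan (rest done : List Char) (hne : done ≠ []) :
    giveVarsMultipliersLoop (done ++ rest) done.length =
      done ++ pvScan (done.getLast hne) rest := by
  induction rest generalizing done with
  | nil =>
    rw [giveVarsMultipliersLoop]
    simp [pvScan]
  | cons c rs ih =>
    rw [giveVarsMultipliersLoop]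
    have hlen : done.length < (done ++ c :: rs).length := by
      simp [List.length_append]
    rw [dif_pos hlen]
    have hget : (done ++ c :: rs)[done.length]'hlen = c := by
      simp
    have hdlen : 1 ≤ done.length := List.length_pos_of_ne_nil hne
    have hprev : PySem.List.pyGet? (done ++ c :: rs) ((done.length : Int) - 1) =
        some (done.getLast hne) := by
      have h1 : ((done.length : Int) - 1) = ((done.length - 1 : Nat) : Int) := by omega
      rw [h1, PySem.List.pyGet?_natCast]
      rw [List.getElem?_append_left (by omega)]
      rw [List.getElem?_eq_getElem (by omega)]
      simp [List.getLast_eq_getElem]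
    simp only [hget, hprev]
    have hi0 : decide (done.length ≠ 0) = true := by simp; omega
    by_cases hc : (pvIsVar c && (pvIsDigit (done.getLast hne) || pvIsVar (done.getLast hne))) = true
    · rw [if_pos (by
        simp only [Bool.and_eq_true, decide_eq_true_eq] at hc ⊢
        exact ⟨hc, by omega⟩)]
      have htake : (done ++ c :: rs).take done.length = done := by simp
      have hdrop : (done ++ c :: rs).drop done.length = c :: rs := by simp
      rw [htake, hdrop]
      have h2 : done ++ '*' :: c :: rs = (done ++ ['*', c]) ++ rs := by simp
      have h3 : done.length + 2 = (done ++ ['*', c]).length := by simp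
      rw [h2, h3, ih (done ++ ['*', c]) (by simp)]
      simp [pvScan, hc]
    · simp only [Bool.not_eq_true] at hc
      rw [if_neg (by simp [hc])]
      have h2 : done ++ c :: rs = (done ++ [c]) ++ rs := by simp
      have h3 : done.length + 1 = (done ++ [c]).length := by simp
      rw [h2, h3, ih (done ++ [c]) (by simp)]
      simp [pvScan, hc]

theorem pvLoop_zero (l : List Char) :
    giveVarsMultipliersLoop l 0 =
      (match l with
       | [] => []
       | c :: rest => c :: pvScan c rest) := by
  match l with
  | [] => rw [giveVarsMultipliersLoop]; simp
  | c :: rest =>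
    rw [giveVarsMultipliersLoop]
    have h0 : (0 : Nat) < (c :: rest).length := by simp
    rw [dif_pos h0]
    rw [if_neg (by simp)]
    have := pvLoop_scan rest [c] (by simp)
    simpa using this

-- ===== VERDICT (by name: the statement is the Claim_ definition above) =====
theorem giveVarsMultipliers_spec : Claim_equal_giveVarsMultipliers := by
  intro exp _
  unfold Spec_giveVarsMultipliers giveVarsMultipliers giveVarsMultipliers_alt
  rw [pvLoop_zero]
  match h : exp.toList with
  | [] => simp
  | c :: rest =>
    simp only [List.take_succ_cons, List.take_zero, List.tail_cons]
    rw [pvFoldl_scan rest c [c]]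
    simp
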